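-- pv_equiv track=rewrite | github.com/mharsijamel/odoo-five | addons/l10n_tn_treasury/models/amount_to_text_fr.py | _convert_nn_nl
-- ===== SOURCE A (Python) =====
-- to_19_nl = ('Nul', 'Een', 'Twee', 'Drie', 'Vier', 'Vijf', 'Zes',
--             'Zeven', 'Acht', 'Negen', 'Tien', 'Elf', 'Twaalf', 'Dertien',
--             'Veertien', 'Vijftien', 'Zestien', 'Zeventien', 'Achttien', 'Negentien')
--
-- tens_nl = ('Twintig', 'Dertig', 'Veertig', 'Vijftig', 'Zestig', 'Zeventig', 'Tachtig', 'Negentig')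
--
-- def _convert_nn_nl(val):
--     """ convert a value < 100 to Dutch
--     """
--     if val < 20:
--         return to_19_nl[val]
--     for (dcap, dval) in ((k, 20 + (10 * v)) for (v, k) in enumerate(tens_nl)):
--         if dval + 10 > val:
--             if val % 10:
--                 return dcap + '-' + to_19_nl[val % 10]
--             return dcap
-- ===== SOURCE B (Python) =====
-- to_19_nl = ('Nul', 'Een', 'Twee', 'Drie', 'Vier', 'Vijf', 'Zes',
--             'Zeven', 'Acht', 'Negen', 'Tien', 'Elf', 'Twaalf', 'Dertien',
--             'Veertien', 'Vijftien', 'Zestien', 'Zeventien', 'Achttien', 'Negentien')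
--
-- tens_nl = ('Twintig', 'Dertig', 'Veertig', 'Vijftig', 'Zestig', 'Zeventig', 'Tachtig', 'Negentig')
--
-- def _convert_nn_nl(val):
--     """ convert a value < 100 to Dutch (direct index arithmetic, no search loop) """
--     if val < 20:
--         return to_19_nl[val]
--     dcap = tens_nl[val // 10 - 2]
--     rem = val % 10
--     return dcap + '-' + to_19_nl[rem] if rem else dcap
-- ===== Notes on version B (the rewrite author's own statement) =====
-- stated objective: simpler
-- what changed: Replaced the enumerate-and-search loop over tens_nl with direct index arithmetic (tens_nl[val // 10 - 2] plus val % 10).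
-- outside the precondition, e.g. on _convert_nn_nl(100): A returns None, B raises IndexError
import Mathlib
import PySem

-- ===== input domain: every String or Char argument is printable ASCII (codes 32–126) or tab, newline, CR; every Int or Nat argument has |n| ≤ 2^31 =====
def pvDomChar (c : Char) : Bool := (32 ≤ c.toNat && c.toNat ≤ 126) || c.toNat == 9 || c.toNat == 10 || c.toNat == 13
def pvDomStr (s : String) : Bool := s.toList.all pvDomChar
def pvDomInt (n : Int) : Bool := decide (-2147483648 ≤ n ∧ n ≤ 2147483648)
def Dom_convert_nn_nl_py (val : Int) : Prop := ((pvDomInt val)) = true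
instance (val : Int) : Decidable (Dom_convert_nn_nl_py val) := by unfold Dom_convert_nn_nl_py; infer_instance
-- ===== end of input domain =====

-- B replaces A's search loop over the tens table with direct index arithmetic (simpler).


def to19nl : List String := ["Nul", "Een", "Twee", "Drie", "Vier", "Vijf", "Zes",
  "Zeven", "Acht", "Negen", "Tien", "Elf", "Twaalf", "Dertien",
  "Veertien", "Vijftien", "Zestien", "Zeventien", "Achttien", "Negentien"]

def tensnl : List String := ["Twintig", "Dertig", "Veertig", "Vijftig", "Zestig", "Zeventig", "Tachtig", "Negentig"]

-- ===== PORT A =====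
-- the generator expression ((k, 20 + 10*v) for (v,k) in enumerate(tens_nl)) and the search loop
def convertLoopA (val : Int) : List (Int × String) → String
  | [] => ""          -- Python falls off the loop and returns None; excluded by Pre_
  | (dval, dcap) :: rest =>
      if dval + 10 > val then
        if PySem.Int.mod val 10 ≠ 0 then
          dcap ++ "-" ++ (PySem.List.pyGet? to19nl (PySem.Int.mod val 10)).getD ""
        else dcap
      else convertLoopA val rest

def convert_nn_nl_py (val : Int) : String :=
  if val < 20 then (PySem.List.pyGet? to19nl val).getD ""   -- to_19_nl[val]; none (IndexError) is outside Pre_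
  else convertLoopA val ((PySem.List.enumerate tensnl).map (fun p => (20 + 10 * (p.1 : Int), p.2)))

-- ===== PORT B =====
def convert_nn_nl_py_alt (val : Int) : String :=
  if val < 20 then (PySem.List.pyGet? to19nl val).getD ""
  else
    let dcap := (PySem.List.pyGet? tensnl (PySem.Int.floordiv val 10 - 2)).getD ""
    let rem := PySem.Int.mod val 10
    if rem ≠ 0 then dcap ++ "-" ++ (PySem.List.pyGet? to19nl rem).getD "" else dcap

-- ===== PRECONDITION & SPEC =====
-- Pre_ excludes inputs below the negative-indexing range of the units table, where A raises
-- IndexError, and inputs at or above one hundred, where A falls off the loop and returns None (not a String).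
def Pre_convert_nn_nl_py (val : Int) : Prop := -20 ≤ val ∧ val < 100
instance (val : Int) : Decidable (Pre_convert_nn_nl_py val) := by unfold Pre_convert_nn_nl_py; infer_instance
def pvWitness_convert_nn_nl_py : Int := 42

def Spec_convert_nn_nl_py (val : Int) (out : String) : Prop := out = convert_nn_nl_py_alt val
instance (val : Int) (out : String) : Decidable (Spec_convert_nn_nl_py val out) := by unfold Spec_convert_nn_nl_py; infer_instance

-- ===== CLAIM =====
def Claim_equal_convert_nn_nl_py : Prop := ∀ (val : Int), Dom_convert_nn_nl_py val → Pre_convert_nn_nl_py val → Spec_convert_nn_nl_py val (convert_nn_nl_py val)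

-- ===== LEMMAS AND PROOFS =====

-- ===== VERDICT =====
theorem convert_nn_nl_py_spec : Claim_equal_convert_nn_nl_py := by
  intro val _ hpre
  unfold Pre_convert_nn_nl_py at hpre
  unfold Spec_convert_nn_nl_py
  obtain ⟨h1, h2⟩ := hpre
  interval_cases val <;> decide
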